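-- pv_equiv track=rewrite | github.com/Hippogriff/parsenet-codebase | src/fitting_optimization.py | get_boundary_indices
-- ===== SOURCE A (Python) =====
-- def get_boundary_indices(m, n):
--     l = []
--     for i in range(m):
--         for j in range(n):
--             if (j == 0):
--                 l.append((i, j) )
--             elif (j == n-1):
--                 l.append((i, j))
--     return l
-- ===== SOURCE B (Python) =====
-- def get_boundary_indices(m, n):
--     if n <= 0:
--         return []
--     if n == 1:
--         return [(i, 0) for i in range(m)]
--     return [p for i in range(m) for p in ((i, 0), (i, n - 1))]
-- ===== Notes on version B (the rewrite author's own statement) =====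
-- stated objective: faster
-- what changed: B emits the two boundary pairs (i,0) and (i,n-1) per row directly (with a separate n==1 case), removing A's inner scan over all n columns.
import Mathlib
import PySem

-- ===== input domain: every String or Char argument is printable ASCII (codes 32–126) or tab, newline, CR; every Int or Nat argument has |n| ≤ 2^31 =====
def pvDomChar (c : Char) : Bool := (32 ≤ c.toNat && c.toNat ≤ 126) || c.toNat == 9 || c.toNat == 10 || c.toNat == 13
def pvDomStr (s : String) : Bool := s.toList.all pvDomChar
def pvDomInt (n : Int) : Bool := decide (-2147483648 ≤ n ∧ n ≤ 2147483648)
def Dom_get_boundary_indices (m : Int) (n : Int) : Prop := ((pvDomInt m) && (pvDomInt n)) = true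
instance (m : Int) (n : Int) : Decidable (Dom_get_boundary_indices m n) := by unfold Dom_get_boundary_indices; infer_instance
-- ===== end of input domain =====

-- B removes A's inner scan over all n columns by appending the two boundary pairs per row directly (O(m) vs O(m*n)).


-- ===== PORT A =====
def get_boundary_indices (m : Int) (n : Int) : List (Int × Int) :=
  (PySem.List.pyRange 0 m 1).foldl (fun l i =>
    (PySem.List.pyRange 0 n 1).foldl (fun l j =>
      if j = 0 then l ++ [(i, j)]
      else if j = n - 1 then l ++ [(i, j)]
      else l) l) []

-- ===== PORT B =====
def get_boundary_indices_alt (m : Int) (n : Int) : List (Int × Int) :=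
  if n ≤ 0 then []
  else if n = 1 then (PySem.List.pyRange 0 m 1).map (fun i => (i, 0))
  else (PySem.List.pyRange 0 m 1).flatMap (fun i => [(i, 0), (i, n - 1)])

-- ===== PRECONDITION & SPEC =====
def Spec_get_boundary_indices (m : Int) (n : Int) (out : List (Int × Int)) : Prop := out = get_boundary_indices_alt m n
instance (m : Int) (n : Int) (out : List (Int × Int)) : Decidable (Spec_get_boundary_indices m n out) := by unfold Spec_get_boundary_indices; infer_instance

-- ===== CLAIM (what is proved, stated in full; the proofs are below) =====
def Claim_equal_get_boundary_indices : Prop := ∀ (m : Int) (n : Int), Dom_get_boundary_indices m n → Spec_get_boundary_indices m n (get_boundary_indices m n)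

-- ===== LEMMAS AND PROOFS =====

-- the pairs A's inner loop over range(n) appends for row i
def pvRow (n : Int) (i : Int) : List (Int × Int) :=
  if n ≤ 0 then [] else if n = 1 then [(i, 0)] else [(i, 0), (i, n - 1)]

-- what A's inner-loop body contributes at column j
def pvG (n : Int) (i : Int) (j : Int) : List (Int × Int) :=
  if j = 0 then [(i, j)] else if j = n - 1 then [(i, j)] else []

lemma pvInner_eq (n i : Int) (l : List (Int × Int)) :
    (PySem.List.pyRange 0 n 1).foldl (fun l j =>
      if j = 0 then l ++ [(i, j)]
      else if j = n - 1 then l ++ [(i, j)]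
      else l) l = l ++ pvRow n i := by
  have hfun : (fun (l : List (Int × Int)) j =>
      if j = 0 then l ++ [(i, j)]
      else if j = n - 1 then l ++ [(i, j)]
      else l) = fun l j => l ++ pvG n i j := by
    funext l j
    simp only [pvG]
    split_ifs <;> simp
  rw [hfun, PySem.List.foldl_append_eq_flatMap]
  congr 1
  by_cases h0 : n ≤ 0
  · simp [PySem.List.pyRange_one_eq_nil (by omega : n ≤ 0), pvRow, h0]
  · by_cases h1 : n = 1
    · subst h1
      rw [PySem.List.pyRange_one_cons (by norm_num : (0:Int) < 1),
          PySem.List.pyRange_one_eq_nil (by norm_num : (1:Int) ≤ 0+1)]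
      simp [pvRow, pvG]
    · -- n ≥ 2
      have h2 : 2 ≤ n := by omega
      have hsing := PySem.List.pyRange_one_singleton (a := n - 1)
      rw [(by omega : n - 1 + 1 = n)] at hsing
      rw [PySem.List.pyRange_one_cons (by omega : (0:Int) < n),
          (by norm_num : (0:Int)+1 = 1),
          PySem.List.pyRange_one_append 1 (n-1) n (by omega) (by omega), hsing]
      have hmid : (PySem.List.pyRange 1 (n-1) 1).flatMap (pvG n i) = [] := by
        rw [List.flatMap_eq_nil_iff]
        intro j hj
        rw [PySem.List.mem_pyRange_one] at hj
        obtain ⟨hj1, hj2⟩ := hj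
        simp only [pvG]
        rw [if_neg (by omega), if_neg (by omega)]
      simp [hmid, pvG, pvRow, h0, h1]

theorem get_boundary_indices_spec : Claim_equal_get_boundary_indices := by
  intro m n _
  show get_boundary_indices m n = get_boundary_indices_alt m n
  unfold get_boundary_indices get_boundary_indices_alt
  have houter : ∀ (rs : List Int) (l : List (Int × Int)),
      rs.foldl (fun l i =>
        (PySem.List.pyRange 0 n 1).foldl (fun l j =>
          if j = 0 then l ++ [(i, j)]
          else if j = n - 1 then l ++ [(i, j)]
          else l) l) l = l ++ rs.flatMap (pvRow n) := by
    intro rs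
    induction rs with
    | nil => intro l; simp
    | cons i rs ih =>
      intro l
      rw [List.foldl_cons, pvInner_eq, ih]
      simp [List.flatMap]
  rw [houter]
  by_cases h0 : n ≤ 0
  · simp only [if_pos h0]
    simp [List.flatMap_eq_nil_iff, pvRow, h0]
  · by_cases h1 : n = 1
    · subst h1
      simp only [List.nil_append]
      induction (PySem.List.pyRange 0 m 1) with
      | nil => simp
      | cons i rs ih => simp [ih, pvRow]
    · simp only [if_neg h0, if_neg h1, List.nil_append]
      congr 1
      funext i
      simp [pvRow, h0, h1]
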